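-- pv_equiv track=rewrite | github.com/batsilas/Complex-Data-Management | Algorithms for Join Evaluation/MergeJoinGrouping.py | combineSameNames
-- ===== SOURCE A (Python) =====
-- def combineSameNames(languages):
--     languages.sort()
--     for items in range(0,len(languages)):
--         if items < len(languages)-1:
--             if languages[items][0] == languages[items+1][0]:
--                 languages[items][1].append(languages[items+1][1][0])
--                 del languages[items+1]
--     return languages
-- ===== SOURCE B (Python) =====
-- def combineSameNames(languages):
--     # One forward pass over the sorted list, pairing adjacent equal-name
--     # entries (a merged pair is consumed whole); builds a new list, no in-place del.
--     langs = sorted(languages)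
--     result = []
--     i = 0
--     n = len(langs)
--     while i < n:
--         if i + 1 < n and langs[i][0] == langs[i + 1][0]:
--             result.append([langs[i][0], list(langs[i][1]) + [langs[i + 1][1][0]]])
--             i += 2
--         else:
--             result.append(langs[i])
--             i += 1
--     return result
-- ===== Notes on version B (the rewrite author's own statement) =====
-- stated objective: alternative
-- what changed: B sorts once and builds a new result list in a single forward pass that pairs adjacent equal-name entries, instead of A's index loop over the original length that compares against a shrinking list and deletes merged entries in place.
import Mathlib
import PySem

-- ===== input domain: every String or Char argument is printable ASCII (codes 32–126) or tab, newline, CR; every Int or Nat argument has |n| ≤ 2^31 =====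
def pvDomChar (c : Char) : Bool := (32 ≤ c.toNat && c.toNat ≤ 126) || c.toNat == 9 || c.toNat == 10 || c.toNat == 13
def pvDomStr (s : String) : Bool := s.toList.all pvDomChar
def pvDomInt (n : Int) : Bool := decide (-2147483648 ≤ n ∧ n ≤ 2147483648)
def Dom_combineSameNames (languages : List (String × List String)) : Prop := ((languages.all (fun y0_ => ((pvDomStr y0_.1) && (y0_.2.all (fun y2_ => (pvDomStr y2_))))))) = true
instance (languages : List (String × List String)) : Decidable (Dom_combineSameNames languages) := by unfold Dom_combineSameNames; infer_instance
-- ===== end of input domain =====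

-- B replaces A's index loop with in-loop `del` by a single forward pass over the sorted
-- list that pairs adjacent equal-name entries into a fresh result list (objective: alternative).
-- NOTE: Python A sorts its argument in place and mutates the inner lists; the equivalence
-- proved here is about the RETURN value only (B does not mutate its argument).

-- ===== PORT A =====
-- one iteration of A's `for items in range(0, len(languages))` body, acting on the
-- current (mutated) list; `items < len - 1` is written `items + 1 < st.length`.
-- `languages[items+1][1][0]` is `.headD ""`: the `[]` case (Python IndexError) is
-- excluded by Pre_combineSameNames, so the default is never the value used under Pre_.
def pvStepA (st : List (String × List String)) (items : Nat) : List (String × List String) :=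
  if items + 1 < st.length then
    match st[items]?, st[items + 1]? with
    | some a, some b =>
      if a.1 = b.1 then
        (st.set items (a.1, a.2 ++ [b.2.headD ""])).eraseIdx (items + 1)
      else st
    | _, _ => st
  else st

def combineSameNames (languages : List (String × List String)) : List (String × List String) :=
  let srt := PySem.List.sorted2 languages Prod.fst Prod.snd   -- languages.sort(): tuple order (name, values)
  (List.range srt.length).foldl pvStepA srt

-- ===== PORT B =====
-- Source B's while loop with its two-entry lookahead, as the obvious structural recursion.
def pvMergeB : List (String × List String) → List (String × List String)
  | [] => []
  | [x] => [x]
  | x :: y :: rest =>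
    if x.1 = y.1 then (x.1, x.2 ++ [y.2.headD ""]) :: pvMergeB rest
    else x :: pvMergeB (y :: rest)

def combineSameNames_alt (languages : List (String × List String)) : List (String × List String) :=
  pvMergeB (PySem.List.sorted2 languages Prod.fst Prod.snd)

-- ===== PRECONDITION & SPEC =====
-- Pre_ excludes exactly the inputs on which Python A raises IndexError: a merge whose right
-- member has an empty value list happens iff two entries with the same name both carry [].
def Pre_combineSameNames (languages : List (String × List String)) : Prop :=
  languages.Pairwise (fun p q => ¬(p.1 = q.1 ∧ p.2 = [] ∧ q.2 = []))
instance (languages : List (String × List String)) : Decidable (Pre_combineSameNames languages) := by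
  unfold Pre_combineSameNames; infer_instance

def pvWitness_combineSameNames : (List (String × List String)) :=
  [("python", ["guido"]), ("python", ["bdfl"]), ("lean", [])]

def Spec_combineSameNames (languages : List (String × List String)) (out : List (String × List String)) : Prop := out = combineSameNames_alt languages
instance (languages : List (String × List String)) (out : List (String × List String)) : Decidable (Spec_combineSameNames languages out) := by unfold Spec_combineSameNames; infer_instance

-- ===== CLAIM (what is proved, stated in full; the proofs are below) =====
def Claim_equal_combineSameNames : Prop := ∀ (languages : List (String × List String)), Dom_combineSameNames languages → Pre_combineSameNames languages → Spec_combineSameNames languages (combineSameNames languages)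

-- ===== LEMMAS AND PROOFS =====

-- index/mutation facts at the loop's frontier, done.length = items
lemma pvGet_mid (done t : List (String × List String)) (x : String × List String) :
    (done ++ x :: t)[done.length]? = some x := by
  induction done with
  | nil => rfl
  | cons d ds ih => simp only [List.cons_append, List.length_cons, List.getElem?_cons_succ]; exact ih

lemma pvSet_mid (done t : List (String × List String)) (x a : String × List String) :
    (done ++ x :: t).set done.length a = done ++ a :: t := by
  induction done with
  | nil => rfl
  | cons d ds ih => simp [ih]

lemma pvErase_mid (done t : List (String × List String)) (a y : String × List String) :
    (done ++ a :: y :: t).eraseIdx (done.length + 1) = done ++ a :: t := by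
  induction done with
  | nil => rfl
  | cons d ds ih =>
    simp only [List.cons_append, List.length_cons, List.eraseIdx_cons_succ]
    rw [ih]

-- once the state is exhausted (length ≤ every remaining index), the loop is a no-op
lemma pvLoop_noop (m : Nat) : ∀ (j : Nat) (st : List (String × List String)),
    st.length ≤ j → (List.range' j m).foldl pvStepA st = st := by
  induction m with
  | zero => intro j st _; rfl
  | succ m ih =>
    intro j st h
    rw [List.range'_succ, List.foldl_cons]
    have hst : pvStepA st j = st := by
      unfold pvStepA
      rw [if_neg (by omega)]
    rw [hst]
    exact ih (j + 1) st (by omega)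

-- loop invariant: with done.length = next index and the remaining budget m ≥ |todo|,
-- running A's loop on done ++ todo finishes as done ++ pvMergeB todo
lemma pvLoop_inv (m : Nat) : ∀ (todo done : List (String × List String)),
    todo.length ≤ m →
    (List.range' done.length m).foldl pvStepA (done ++ todo) = done ++ pvMergeB todo := by
  induction m with
  | zero =>
    intro todo done h
    have : todo = [] := List.eq_nil_of_length_eq_zero (by omega)
    subst this; simp [pvMergeB]
  | succ m ih =>
    intro todo done h
    rw [List.range'_succ, List.foldl_cons]
    match todo with
    | [] =>
      rw [List.append_nil]
      have hst : pvStepA done done.length = done := by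
        unfold pvStepA; rw [if_neg (by omega)]
      rw [hst, pvLoop_noop m (done.length + 1) done (by omega)]
      simp [pvMergeB]
    | [x] =>
      have hst : pvStepA (done ++ [x]) done.length = done ++ [x] := by
        unfold pvStepA; rw [if_neg (by simp)]
      rw [hst]
      have := ih [] (done ++ [x]) (by simp)
      simpa [pvMergeB] using this
    | x :: y :: t =>
      have hlen : done.length + 1 < (done ++ x :: y :: t).length := by
        simp only [List.length_append, List.length_cons]; omega
      have hx : (done ++ x :: y :: t)[done.length]? = some x := pvGet_mid done (y :: t) x
      have hy : (done ++ x :: y :: t)[done.length + 1]? = some y := by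
        have := pvGet_mid (done ++ [x]) t y
        simp only [List.append_assoc, List.singleton_append, List.length_append,
          List.length_cons, List.length_nil] at this
        rw [show done.length + 1 = done.length + (0 + 1) by omega]
        exact this
      by_cases hk : x.1 = y.1
      · have hst : pvStepA (done ++ x :: y :: t) done.length
            = done ++ (x.1, x.2 ++ [y.2.headD ""]) :: t := by
          unfold pvStepA
          rw [if_pos hlen, hx, hy]
          show (if x.1 = y.1 then
              ((done ++ x :: y :: t).set done.length (x.1, x.2 ++ [y.2.headD ""])).eraseIdx (done.length + 1)
            else done ++ x :: y :: t) = _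
          rw [if_pos hk, pvSet_mid done (y :: t) x (x.1, x.2 ++ [y.2.headD ""]),
            pvErase_mid done t (x.1, x.2 ++ [y.2.headD ""]) y]
        rw [hst]
        have := ih t (done ++ [(x.1, x.2 ++ [y.2.headD ""])]) (by simp only [List.length_cons] at h; omega)
        simp only [List.append_assoc, List.singleton_append, List.length_append,
          List.length_cons, List.length_nil] at this
        rw [show done.length + 1 = done.length + (0 + 1) by omega, this]
        simp [pvMergeB, hk]
      · have hst : pvStepA (done ++ x :: y :: t) done.length = done ++ x :: y :: t := by
          unfold pvStepA
          rw [if_pos hlen, hx, hy]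
          show (if x.1 = y.1 then
              ((done ++ x :: y :: t).set done.length (x.1, x.2 ++ [y.2.headD ""])).eraseIdx (done.length + 1)
            else done ++ x :: y :: t) = _
          rw [if_neg hk]
        rw [hst]
        have := ih (y :: t) (done ++ [x]) (by simp only [List.length_cons] at h ⊢; omega)
        simp only [List.append_assoc, List.singleton_append, List.length_append,
          List.length_cons, List.length_nil] at this
        rw [show done.length + 1 = done.length + (0 + 1) by omega, this]
        simp [pvMergeB, hk]

-- ===== VERDICT (by name: the statement is the Claim_ definition above) =====
theorem combineSameNames_spec : Claim_equal_combineSameNames := by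
  intro languages _ _
  unfold Spec_combineSameNames combineSameNames combineSameNames_alt
  have := pvLoop_inv (PySem.List.sorted2 languages Prod.fst Prod.snd).length
    (PySem.List.sorted2 languages Prod.fst Prod.snd) [] (le_refl _)
  simpa [List.range_eq_range'] using this
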